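-- pv_equiv track=rewrite | github.com/toanbui1991/thesis-writing | souce code/demand.py | get_tankCapacity
-- ===== SOURCE A (Python) =====
-- def get_tankCapacity(machine):
--     '''
--     output: tankCapacity{'tank': capacity}
--     '''
--     tankCapacity = {}
--     count = 0
--     for t in machine.keys():
--         if t[0] == 'T':
--             count += 1
--             if count == 1:
--                 tankCapacity[t[:2]] = machine[t]
--                 temp = t[:2]
--             elif t[:2] != temp:
--                 tankCapacity[t[:2]] = machine[t]
--                 temp = t[:2]
--     return tankCapacity
-- ===== SOURCE B (Python) =====
-- def get_tankCapacity(machine):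
--     tkeys = [t for t in machine.keys() if t[0] == 'T']
--
--     def go(ts):
--         # recursion on runs: peel the leading run of keys sharing a 2-char
--         # prefix, map the prefix to the run head's capacity, merge the rest
--         if not ts:
--             return {}
--         head = ts[0]
--         p = head[:2]
--         rest = ts[1:]
--         while rest and rest[0][:2] == p:
--             rest = rest[1:]
--         d = {p: machine[head]}
--         for k, v in go(rest).items():
--             d[k] = v
--         return d
--
--     return go(tkeys)
-- ===== Notes on version B (the rewrite author's own statement) =====
-- stated objective: alternative
-- what changed: A's single stateful scan with a count variable and a temp holding the previous prefix is replaced by recursion on runs: filter the T-keys once, then recursively peel off the whole leading 2-char-prefix run, map the prefix to the run head's capacity, and merge the recursively built dict of the remainder via dict update.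
import Mathlib
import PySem

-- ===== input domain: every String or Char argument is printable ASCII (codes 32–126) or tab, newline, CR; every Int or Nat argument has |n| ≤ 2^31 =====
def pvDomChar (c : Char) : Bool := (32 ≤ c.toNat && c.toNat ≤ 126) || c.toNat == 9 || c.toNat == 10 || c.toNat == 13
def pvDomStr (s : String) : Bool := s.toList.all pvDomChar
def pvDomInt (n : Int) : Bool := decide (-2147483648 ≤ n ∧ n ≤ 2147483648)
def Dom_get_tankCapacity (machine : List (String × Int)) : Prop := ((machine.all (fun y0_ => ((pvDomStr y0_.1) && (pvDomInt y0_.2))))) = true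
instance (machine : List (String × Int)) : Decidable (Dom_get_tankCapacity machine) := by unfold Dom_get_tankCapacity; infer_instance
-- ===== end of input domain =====

-- B replaces A's stateful count/temp scan by recursion on runs: peel the leading
-- 2-char-prefix run of the filtered T-keys, map the prefix to the run head's
-- capacity, and merge the recursively built dict of the remainder (objective: alternative).

-- ===== PORT A =====
-- t[0] == 'T'
def pvIsT (t : String) : Bool := PySem.Str.pyGet? t 0 == some 'T'
-- t[:2]
def pvP2 (t : String) : String := PySem.Str.slice t none (some 2)
-- the body of A's for-loop; state = (tankCapacity, count, temp)
def pvStepA (d : PySem.Dict String Int) (st : PySem.Dict String Int × Int × String) (t : String) :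
    PySem.Dict String Int × Int × String :=
  if pvIsT t then
    let count := st.2.1 + 1
    if count == 1 then (st.1.insert (pvP2 t) (d.getD t 0), count, pvP2 t)
    else if pvP2 t != st.2.2 then (st.1.insert (pvP2 t) (d.getD t 0), count, pvP2 t)
    else (st.1, count, st.2.2)
  else st

def get_tankCapacity (machine : List (String × Int)) : List (String × Int) :=
  let d := PySem.Dict.ofList machine
  ((d.keys.foldl (pvStepA d) (PySem.Dict.empty, 0, "")).1).items

-- ===== PORT B =====
-- the recursive helper go(ts): peel the leading run, merge the rest
def pvGo (d : PySem.Dict String Int) : List String → PySem.Dict String Int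
  | [] => PySem.Dict.empty
  | head :: rest =>
    let p := pvP2 head
    -- 'while rest and rest[0][:2] == p: rest = rest[1:]'
    let rest' := rest.dropWhile (fun s => pvP2 s == p)
    let d0 := (PySem.Dict.empty).insert p (d.getD head 0)
    -- 'for k, v in go(rest).items(): d[k] = v'
    ((pvGo d rest').items).foldl (fun acc kv => acc.insert kv.1 kv.2) d0
termination_by ts => ts.length
decreasing_by
  have := List.length_dropWhile_le (p := fun s => pvP2 s == pvP2 head) rest
  simpa using Nat.lt_succ_of_le this

def get_tankCapacity_alt (machine : List (String × Int)) : List (String × Int) :=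
  let d := PySem.Dict.ofList machine
  (pvGo d (d.keys.filter pvIsT)).items

-- ===== PRECONDITION & SPEC =====
-- Pre_ excludes dicts containing a zero-length key, on which both A and B raise IndexError at t[0].
def Pre_get_tankCapacity (machine : List (String × Int)) : Prop :=
  ∀ p ∈ machine, p.1 ≠ ""
instance (machine : List (String × Int)) : Decidable (Pre_get_tankCapacity machine) := by
  unfold Pre_get_tankCapacity; infer_instance
def pvWitness_get_tankCapacity : (List (String × Int)) := [("T101", 50), ("A2", 3), ("T203", 70)]

def Spec_get_tankCapacity (machine : List (String × Int)) (out : List (String × Int)) : Prop := out = get_tankCapacity_alt machine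
instance (machine : List (String × Int)) (out : List (String × Int)) : Decidable (Spec_get_tankCapacity machine out) := by unfold Spec_get_tankCapacity; infer_instance

-- ===== CLAIM (what is proved, stated in full; the proofs are below) =====
def Claim_equal_get_tankCapacity : Prop := ∀ (machine : List (String × Int)), Dom_get_tankCapacity machine → Pre_get_tankCapacity machine → Spec_get_tankCapacity machine (get_tankCapacity machine)

-- ===== LEMMAS AND PROOFS =====

-- proof-only characterisation: the run heads of a key list, given the previous key's 2-prefix
def pvHeads (prev : Option String) : List String → List String
  | [] => []
  | t :: rest =>
    if (match prev with | none => true | some q => pvP2 t != q) then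
      t :: pvHeads (some (pvP2 t)) rest
    else pvHeads (some (pvP2 t)) rest

-- insert of the run head's (k, v); pvInsB d = one merge step of B's for-loop
def pvInsB (d : PySem.Dict String Int) (dd : PySem.Dict String Int) (t : String) : PySem.Dict String Int :=
  dd.insert (pvP2 t) (d.getD t 0)

-- A's fold equals inserting the run heads of the filtered keys
lemma pvFoldA (d : PySem.Dict String Int) (ks : List String)
    (tc : PySem.Dict String Int) (temp : String) (n : Int) (hn : 0 ≤ n) :
    (ks.foldl (pvStepA d) (tc, n, temp)).1
    = (pvHeads (if n = 0 then none else some temp) (ks.filter pvIsT)).foldl (pvInsB d) tc := by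
  induction ks generalizing tc temp n with
  | nil => simp [pvHeads]
  | cons t rest ih =>
    by_cases ht : pvIsT t
    · rcases lt_or_eq_of_le hn with hpos | hzero
      · -- n ≥ 1 : the elif branch
        have h1 : (n + 1 == 1) = false := by
          simp only [beq_eq_false_iff_ne]; omega
        by_cases hne : pvP2 t != temp
        · have := ih (tc.insert (pvP2 t) (d.getD t 0)) (pvP2 t) (n + 1) (by omega)
          simp only [List.foldl_cons, List.filter_cons, ht, if_true, pvStepA, h1,
            Bool.false_eq_true, if_false, hne, pvHeads] at this ⊢
          simp only [if_neg (by omega : ¬ n = 0), if_neg (by omega : ¬ n + 1 = 0)] at this ⊢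
          have hne' : ¬ pvP2 t = temp := bne_iff_ne.mp hne
          simpa [hne', pvInsB] using this
        · have heq : pvP2 t = temp := by simpa using hne
          have := ih tc temp (n + 1) (by omega)
          simp only [List.foldl_cons, List.filter_cons, ht, if_true, pvStepA, h1,
            Bool.false_eq_true, if_false, hne, pvHeads] at this ⊢
          simp only [if_neg (by omega : ¬ n = 0), if_neg (by omega : ¬ n + 1 = 0)] at this ⊢
          simpa [heq] using this
      · -- n = 0 : the count == 1 branch
        subst hzero
        have := ih (tc.insert (pvP2 t) (d.getD t 0)) (pvP2 t) 1 (by omega)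
        simp only [List.foldl_cons, List.filter_cons, ht, if_true, pvStepA, pvHeads] at this ⊢
        norm_num at this ⊢
        simpa [pvInsB] using this
    · simp only [List.foldl_cons, List.filter_cons, pvStepA, ht, Bool.false_eq_true, if_false]
      exact ih tc temp n hn

-- skipping the rest of a run: pvHeads with a known previous prefix = pvHeads from scratch after dropWhile
lemma pvHeads_dropWhile (p : String) (ts : List String) :
    pvHeads (some p) ts = pvHeads none (ts.dropWhile (fun s => pvP2 s == p)) := by
  induction ts with
  | nil => simp [pvHeads]
  | cons t rest ih =>
    by_cases h : pvP2 t = p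
    · simp only [pvHeads, List.dropWhile_cons, h, BEq.rfl, if_true, bne_self_eq_false,
        Bool.false_eq_true, if_false]
      simpa [h] using ih
    · have hb : (pvP2 t == p) = false := by simpa using h
      simp [pvHeads, hb, h]

-- two inserts at distinct keys commute (items included) when the first-inserted key is already present
lemma pvInsert_comm_of_contains (E : PySem.Dict String Int) (k k' : String) (v v' : Int)
    (hk : E.contains k = true) (hne : k' ≠ k) :
    (E.insert k' v').insert k v = (E.insert k v).insert k' v' := by
  apply PySem.Dict.ext
  have c1 : (E.insert k' v').contains k = true := by
    rw [PySem.Dict.contains_insert]; simp [hk]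
  by_cases hk' : E.contains k' = true
  · have c2 : (E.insert k v).contains k' = true := by
      rw [PySem.Dict.contains_insert]; simp [hk']
    rw [PySem.Dict.items_insert_of_contains _ _ c1,
        PySem.Dict.items_insert_of_contains _ _ hk',
        PySem.Dict.items_insert_of_contains _ _ c2,
        PySem.Dict.items_insert_of_contains _ _ hk]
    simp only [List.map_map]
    apply List.map_congr_left
    intro q _
    by_cases h1 : q.1 = k <;> by_cases h2 : q.1 = k' <;>
      simp_all [Function.comp]
  · have hk'f : E.contains k' = false := by simpa using hk'
    have c2 : (E.insert k v).contains k' = false := by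
      rw [PySem.Dict.contains_insert]; simp [hk'f, hne]
    rw [PySem.Dict.items_insert_of_contains _ _ c1,
        PySem.Dict.items_insert_of_not_contains _ _ hk'f,
        PySem.Dict.items_insert_of_not_contains _ _ c2,
        PySem.Dict.items_insert_of_contains _ _ hk]
    simp only [List.map_append, List.map_cons, List.map_nil]
    have : (((k', v') : String × Int).1 == k) = false := by simpa using hne
    simp [this]

-- pushing a pending overwrite at k through a fold over pairs whose keys differ from k
lemma pvFold_insert_push (k : String) (v : Int) :
    ∀ (L : List (String × Int)) (E : PySem.Dict String Int),
      E.contains k = true → (∀ p ∈ L, p.1 ≠ k) →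
      (L.foldl (fun acc kv => acc.insert kv.1 kv.2) E).insert k v
        = L.foldl (fun acc kv => acc.insert kv.1 kv.2) (E.insert k v) := by
  intro L
  induction L with
  | nil => intro E _ _; rfl
  | cons q L' ih =>
    intro E hE hL
    have hq : q.1 ≠ k := hL q (by simp)
    have h1 : (E.insert q.1 q.2).contains k = true := by
      rw [PySem.Dict.contains_insert]; simp [hE]
    simp only [List.foldl_cons]
    rw [ih _ h1 (fun p hp => hL p (by simp [hp])),
        pvInsert_comm_of_contains E k q.1 v q.2 hE hq]

-- replaying a dict's items with insert distributes over insert (needs unique keys)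
lemma pvReplay_insert (e : PySem.Dict String Int) (k : String) (v : Int)
    (d0 : PySem.Dict String Int) (hnd : e.keys.Nodup) :
    ((e.insert k v).items).foldl (fun acc kv => acc.insert kv.1 kv.2) d0
      = ((e.items).foldl (fun acc kv => acc.insert kv.1 kv.2) d0).insert k v := by
  by_cases hc : e.contains k = true
  · -- k occurs exactly once in e.items: split there
    have hkmem : k ∈ e.keys := (PySem.Dict.contains_iff_mem_keys e k).mp hc
    have hkeys : e.keys = e.items.map Prod.fst := by simp [PySem.Dict.keys]
    rw [hkeys] at hkmem hnd
    obtain ⟨q, hq, hq1⟩ := List.mem_map.mp hkmem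
    obtain ⟨L1, L2, hsplit⟩ := List.append_of_mem hq
    obtain ⟨k', w⟩ := q
    rw [show k' = k from hq1] at hsplit
    have hnd' := hnd
    rw [hsplit, List.map_append, List.map_cons] at hnd'
    have hd := List.nodup_append.mp hnd'
    have hq1notin : k ∉ L2.map Prod.fst := (List.nodup_cons.mp hd.2.1).1
    have hL1 : ∀ p ∈ L1, p.1 ≠ k := by
      intro p hp hpk
      exact hd.2.2 p.1 (List.mem_map_of_mem hp) k (by simp) hpk
    have hL2 : ∀ p ∈ L2, p.1 ≠ k := by
      intro p hp hpk
      exact hq1notin (hpk ▸ List.mem_map_of_mem hp)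
    have hitems : (e.insert k v).items = L1 ++ (k, v) :: L2 := by
      rw [PySem.Dict.items_insert_of_contains _ _ hc, hsplit, List.map_append, List.map_cons]
      congr 1
      · conv_rhs => rw [← List.map_id L1]
        apply List.map_congr_left
        intro p hp
        simp [show (p.1 == k) = false by simpa using hL1 p hp]
      · congr 1
        · simp
        · conv_rhs => rw [← List.map_id L2]
          apply List.map_congr_left
          intro p hp
          simp [show (p.1 == k) = false by simpa using hL2 p hp]
    rw [hitems, hsplit]
    simp only [List.foldl_append, List.foldl_cons]
    rw [pvFold_insert_push k v L2 _ (PySem.Dict.contains_insert_self _ _ _) hL2]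
    congr 1
    exact (PySem.Dict.insert_insert_self _ _ _ _).symm
  · have hcf : e.contains k = false := by simpa using hc
    rw [PySem.Dict.items_insert_of_not_contains _ _ hcf]
    simp [List.foldl_append]

-- merging a dict built by a pvInsB-fold into d0 equals continuing the fold from d0
lemma pvMerge (d : PySem.Dict String Int) :
    ∀ (hs : List String) (e d0 : PySem.Dict String Int), e.keys.Nodup →
      ((hs.foldl (pvInsB d) e).items).foldl (fun acc kv => acc.insert kv.1 kv.2) d0
        = hs.foldl (pvInsB d) ((e.items).foldl (fun acc kv => acc.insert kv.1 kv.2) d0) := by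
  intro hs
  induction hs with
  | nil => intro e d0 _; rfl
  | cons t hs ih =>
    intro e d0 hnd
    simp only [List.foldl_cons]
    rw [ih (pvInsB d e t) d0 (PySem.Dict.nodup_keys_insert _ _ _ hnd)]
    congr 1
    exact pvReplay_insert e (pvP2 t) (d.getD t 0) d0 hnd

-- B's recursion computes the left fold of pvInsB over the run heads
lemma pvGo_eq_foldHeads_bounded (d : PySem.Dict String Int) :
    ∀ (n : Nat) (ts : List String), ts.length ≤ n →
      pvGo d ts = (pvHeads none ts).foldl (pvInsB d) PySem.Dict.empty := by
  intro n
  induction n with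
  | zero =>
    intro ts h
    have : ts = [] := List.eq_nil_of_length_eq_zero (Nat.le_zero.mp h)
    subst this
    simp [pvGo, pvHeads]
  | succ n ih =>
    intro ts h
    match ts with
    | [] => simp [pvGo, pvHeads]
    | t :: rest =>
      have hlen : (rest.dropWhile (fun s => pvP2 s == pvP2 t)).length ≤ n :=
        le_trans (List.length_dropWhile_le _ _) (by simpa using h)
      rw [pvGo]
      rw [ih _ hlen,
          pvMerge d _ PySem.Dict.empty _ PySem.Dict.nodup_keys_empty]
      simp only [pvHeads]
      rw [pvHeads_dropWhile]
      rfl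

lemma pvGo_eq_foldHeads (d : PySem.Dict String Int) (ts : List String) :
    pvGo d ts = (pvHeads none ts).foldl (pvInsB d) PySem.Dict.empty :=
  pvGo_eq_foldHeads_bounded d ts.length ts le_rfl

-- ===== VERDICT (by name: the statement is the Claim_ definition above) =====
theorem get_tankCapacity_spec : Claim_equal_get_tankCapacity := by
  intro machine _ _
  unfold Spec_get_tankCapacity get_tankCapacity get_tankCapacity_alt
  simp only []
  rw [pvFoldA _ _ _ _ 0 le_rfl, pvGo_eq_foldHeads]
  rfl
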